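-- pv_equiv track=rewrite | github.com/Beaster0001/clicksafesrilanka | clicksafe-api/qr_service.py | _has_suspicious_keywords
-- ===== SOURCE A (Python) =====
-- def _has_suspicious_keywords(url: str) -> bool:
--     """Check for suspicious keywords in URL"""
--     suspicious_keywords = [
--         'secure', 'account', 'update', 'verify', 'login', 'signin',
--         'banking', 'paypal', 'amazon', 'microsoft', 'google',
--         'free', 'win', 'prize', 'urgent', 'suspend', 'limited'
--     ]
--     url_lower = url.lower()
--     return any(keyword in url_lower for keyword in suspicious_keywords)
-- ===== SOURCE B (Python) =====
-- def _has_suspicious_keywords(url: str) -> bool: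
--     """Check for suspicious keywords in URL"""
--     suspicious_keywords = [
--         'secure', 'account', 'update', 'verify', 'login', 'signin',
--         'banking', 'paypal', 'amazon', 'microsoft', 'google',
--         'free', 'win', 'prize', 'urgent', 'suspend', 'limited'
--     ]
--     url_lower = url.lower()
--     # single left-to-right pass: at each position, does some keyword start here?
--     return any(url_lower.startswith(k, i)
--                for i in range(len(url_lower))
--                for k in suspicious_keywords)
-- ===== Notes on version B (the rewrite author's own statement) =====
-- stated objective: alternative
-- what changed: Replaces 17 independent whole-string substring scans (one per keyword) with a single left-to-right positional pass over the lowered URL that checks at each index whether some keyword starts there.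
import Mathlib
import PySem

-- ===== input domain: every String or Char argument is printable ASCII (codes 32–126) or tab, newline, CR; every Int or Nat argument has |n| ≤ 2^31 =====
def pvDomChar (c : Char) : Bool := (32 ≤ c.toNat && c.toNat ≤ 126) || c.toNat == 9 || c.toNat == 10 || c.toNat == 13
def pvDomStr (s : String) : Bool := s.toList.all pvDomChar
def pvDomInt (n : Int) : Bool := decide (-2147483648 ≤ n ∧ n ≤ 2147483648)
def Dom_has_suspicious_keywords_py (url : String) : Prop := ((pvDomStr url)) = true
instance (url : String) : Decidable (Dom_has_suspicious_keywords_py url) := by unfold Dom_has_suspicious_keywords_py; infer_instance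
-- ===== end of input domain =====

-- B replaces 17 independent substring scans by one positional pass over the lowered URL (alternative decomposition, same behaviour).


def pvKeywords : List String :=
  ["secure", "account", "update", "verify", "login", "signin",
   "banking", "paypal", "amazon", "microsoft", "google",
   "free", "win", "prize", "urgent", "suspend", "limited"]

-- ===== PORT A =====
-- any(keyword in url_lower for keyword in suspicious_keywords)
def has_suspicious_keywords_py (url : String) : Bool :=
  let url_lower := PySem.Str.lower url
  pvKeywords.any (fun keyword => PySem.Str.isIn keyword url_lower)

-- ===== PORT B =====
-- any(url_lower.startswith(k, i) for i in range(len(url_lower)) for k in keywords)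
def has_suspicious_keywords_py_alt (url : String) : Bool :=
  let u := (PySem.Str.lower url).toList
  (List.range u.length).any (fun i => pvKeywords.any (fun k => PySem.Chars.startswith (u.drop i) k.toList))

-- ===== PRECONDITION & SPEC =====
def Spec_has_suspicious_keywords_py (url : String) (out : Bool) : Prop := out = has_suspicious_keywords_py_alt url
instance (url : String) (out : Bool) : Decidable (Spec_has_suspicious_keywords_py url out) := by unfold Spec_has_suspicious_keywords_py; infer_instance

-- ===== CLAIM (what is proved, stated in full; the proofs are below) =====
def Claim_equal_has_suspicious_keywords_py : Prop := ∀ (url : String), Dom_has_suspicious_keywords_py url → Spec_has_suspicious_keywords_py url (has_suspicious_keywords_py url)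

-- ===== LEMMAS AND PROOFS =====

-- `sub in s` equals "some position below len(s) where sub starts", for nonempty sub
theorem pv_isIn_eq_range_any (sub s : List Char) (hsub : sub ≠ []) :
    PySem.Chars.isIn sub s
      = (List.range s.length).any (fun i => PySem.Chars.startswith (s.drop i) sub) := by
  rcases h : PySem.Chars.isIn sub s with _ | _
  · symm
    rw [List.any_eq_false]
    intro i _
    rw [Bool.not_eq_true, ← Bool.not_eq_true, PySem.Chars.startswith_iff]
    intro hpre
    have : PySem.Chars.isIn sub s = true := by
      rw [← PySem.Chars.exists_prefix_drop_iff_isIn]; exact ⟨i, hpre⟩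
    simp [h] at this
  · symm
    rw [List.any_eq_true]
    have := (PySem.Chars.exists_prefix_drop_iff_isIn sub s).2 h
    obtain ⟨j, hj⟩ := this
    refine ⟨j, ?_, (PySem.Chars.startswith_iff _ _).2 hj⟩
    rw [List.mem_range]
    by_contra hle
    push Not at hle
    rw [List.drop_eq_nil_of_le hle] at hj
    exact hsub (List.prefix_nil.mp hj)

theorem has_suspicious_keywords_py_eq (url : String) :
    has_suspicious_keywords_py url = has_suspicious_keywords_py_alt url := by
  unfold has_suspicious_keywords_py has_suspicious_keywords_py_alt
  simp only [PySem.Str.isIn_eq]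
  rw [Bool.eq_iff_iff]
  simp only [List.any_eq_true]
  constructor
  · rintro ⟨k, hk, h⟩
    rw [pv_isIn_eq_range_any _ _ (by fin_cases hk <;> simp), List.any_eq_true] at h
    obtain ⟨i, hi, h⟩ := h
    exact ⟨i, hi, k, hk, h⟩
  · rintro ⟨i, hi, k, hk, h⟩
    refine ⟨k, hk, ?_⟩
    rw [pv_isIn_eq_range_any _ _ (by fin_cases hk <;> simp), List.any_eq_true]
    exact ⟨i, hi, h⟩

-- ===== VERDICT (by name: the statement is the Claim_ definition above) =====
theorem has_suspicious_keywords_py_spec : Claim_equal_has_suspicious_keywords_py := by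
  intro url _
  unfold Spec_has_suspicious_keywords_py
  exact has_suspicious_keywords_py_eq url
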